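-- pv_equiv track=rewrite | github.com/Pigbowl/BackEndS | Python_S/ReadDBAndGenerateProtocol.py | merge_dicts_by_keys
-- ===== SOURCE A (Python) =====
-- def merge_dicts_by_keys(arr, key_fields=('POSITION', 'Type', 'SubType'), priority_field='Mandatory'):
--     """
--     按指定关键属性合并字典列表，保留优先级字段（Mandatory）最大的字典
--     :param arr: 原始字典列表
--     :param key_fields: 关键属性（用于分组的字段，需完全匹配才合并）
--     :param priority_field: 优先级字段（值越大越优先保留）
--     :return: 合并后的字典列表
--     """
--     # 临时字典：key=关键属性组成的元组，value=当前组最优字典（Mandatory最大）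
--     merged_dict = {}
--
--     for item in arr:
--         # 1. 生成分组键（关键属性的值组成元组，可哈希）
--         # 若字典缺少关键属性，会抛出KeyError，确保所有字典都含关键属性
--         group_key = tuple(item[field] for field in key_fields)
--
--         # 2. 对比当前字典与组内已有字典的优先级，保留更优的
--         if group_key not in merged_dict:
--             # 组内无数据，直接加入
--             merged_dict[group_key] = item
--         else:
--             # 组内已有数据，保留Mandatory更大的；若相等，保留后出现的（覆盖前一个）
--             current_priority = item[priority_field]
--             existing_priority = merged_dict[group_key][priority_field]
--             if current_priority > existing_priority:
--                 merged_dict[group_key] = item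
--             elif current_priority == existing_priority:
--                 # 优先级相等时，保留最后一个（按原始列表顺序，后出现的覆盖前一个）
--                 merged_dict[group_key] = item
--
--     # 3. 提取合并后的字典，返回列表（顺序与原始列表中首次出现的分组顺序一致）
--     return list(merged_dict.values())
-- ===== SOURCE B (Python) =====
-- def merge_dicts_by_keys(arr, key_fields=('POSITION', 'Type', 'SubType'), priority_field='Mandatory'):
--     # Two-pass decomposition: first group items by key tuple, then reduce each
--     # group to its best member (>= keeps the later item on ties, like A).
--     groups = {}
--     for item in arr:
--         groups.setdefault(tuple(item[field] for field in key_fields), []).append(item)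
--     result = []
--     for items in groups.values():
--         best = items[0]
--         for it in items[1:]:
--             if it[priority_field] >= best[priority_field]:
--                 best = it
--         result.append(best)
--     return result
-- ===== Notes on version B (the rewrite author's own statement) =====
-- stated objective: alternative
-- what changed: Replaces A's single-pass keep-best-so-far dict update with a two-pass decomposition: first build a dict grouping all items by their key tuple, then reduce each group list to its maximal-priority member (>= keeps the later item, reading a priority only in groups of two or more, like A).
import Mathlib
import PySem

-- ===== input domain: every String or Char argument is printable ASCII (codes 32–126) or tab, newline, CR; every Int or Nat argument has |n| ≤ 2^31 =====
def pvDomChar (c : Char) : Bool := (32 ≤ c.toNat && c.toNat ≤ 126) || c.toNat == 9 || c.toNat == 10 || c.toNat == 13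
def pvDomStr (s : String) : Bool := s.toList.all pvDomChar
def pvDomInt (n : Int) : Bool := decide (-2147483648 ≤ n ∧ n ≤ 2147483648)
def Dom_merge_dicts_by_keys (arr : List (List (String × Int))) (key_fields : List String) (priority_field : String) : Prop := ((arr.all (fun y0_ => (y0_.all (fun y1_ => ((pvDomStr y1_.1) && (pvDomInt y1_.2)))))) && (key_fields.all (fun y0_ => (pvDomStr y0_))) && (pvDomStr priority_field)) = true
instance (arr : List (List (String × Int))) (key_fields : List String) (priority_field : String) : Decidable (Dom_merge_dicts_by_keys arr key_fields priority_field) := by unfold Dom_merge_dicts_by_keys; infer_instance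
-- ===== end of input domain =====

-- B replaces A's single-pass keep-best dict with a two-pass decomposition (group, then reduce
-- each group to its best member); same cost, alternative structure.

-- ===== PORT A =====
-- item[field]; Pre_ guarantees the field is present wherever the Python reads it
def pvItemGet (item : List (String × Int)) (f : String) : Int :=
  (PySem.Dict.mk item).getD f 0

-- tuple(item[field] for field in key_fields)
def pvGroupKey (key_fields : List String) (item : List (String × Int)) : List Int :=
  key_fields.map (fun f => pvItemGet item f)

-- the body of A's loop
def pvMergeStep (key_fields : List String) (priority_field : String)
    (merged : PySem.Dict (List Int) (List (String × Int))) (item : List (String × Int)) :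
    PySem.Dict (List Int) (List (String × Int)) :=
  let gk := pvGroupKey key_fields item
  if merged.contains gk = false then
    merged.insert gk item
  else
    let cp := pvItemGet item priority_field
    let ep := pvItemGet (merged.getD gk []) priority_field
    if cp > ep then merged.insert gk item
    else if cp = ep then merged.insert gk item
    else merged

def merge_dicts_by_keys (arr : List (List (String × Int))) (key_fields : List String) (priority_field : String) : List (List (String × Int)) :=
  (arr.foldl (pvMergeStep key_fields priority_field) PySem.Dict.empty).values

-- ===== PORT B =====
-- groups.setdefault(tuple(item[f] for f in key_fields), []).append(item)
def pvGroupStep (key_fields : List String)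
    (g : PySem.Dict (List Int) (List (List (String × Int)))) (item : List (String × Int)) :
    PySem.Dict (List Int) (List (List (String × Int))) :=
  g.modify (pvGroupKey key_fields item) [] (· ++ [item])

-- best = items[0]; for it in items[1:]: if it[pf] >= best[pf]: best = it
-- ([] branch is a totalizing guard: group lists are never empty)
def pvBestOf (priority_field : String) (items : List (List (String × Int))) : List (String × Int) :=
  match items with
  | [] => []
  | best :: rest =>
      rest.foldl (fun best it =>
        if pvItemGet it priority_field ≥ pvItemGet best priority_field then it else best) best

def merge_dicts_by_keys_alt (arr : List (List (String × Int))) (key_fields : List String) (priority_field : String) : List (List (String × Int)) :=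
  ((arr.foldl (pvGroupStep key_fields) PySem.Dict.empty).values).map (pvBestOf priority_field)

-- ===== PRECONDITION & SPEC =====
def pvFields (item : List (String × Int)) : List String := item.map Prod.fst
def pvGKeyOpt (key_fields : List String) (item : List (String × Int)) : List (Option Int) :=
  key_fields.map (fun f => (item.find? (fun p => p.1 == f)).map Prod.snd)

-- Pre_ excludes exactly the inputs where the Python raises KeyError: an item missing one of
-- key_fields, or an item in a group of two or more missing priority_field (A reads the
-- priority of every member of a multi-member group, never of a singleton).
def Pre_merge_dicts_by_keys (arr : List (List (String × Int))) (key_fields : List String) (priority_field : String) : Prop :=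
  (∀ it ∈ arr, ∀ f ∈ key_fields, f ∈ pvFields it) ∧
  (∀ it ∈ arr, 1 < arr.countP (fun it' => pvGKeyOpt key_fields it' == pvGKeyOpt key_fields it) →
      priority_field ∈ pvFields it)
instance (arr : List (List (String × Int))) (key_fields : List String) (priority_field : String) : Decidable (Pre_merge_dicts_by_keys arr key_fields priority_field) := by unfold Pre_merge_dicts_by_keys; infer_instance

def pvWitness_merge_dicts_by_keys : (List (List (String × Int))) × List String × String :=
  ([[("k", 1), ("m", 5)], [("k", 1), ("m", 3)]], (["k"], "m"))

def Spec_merge_dicts_by_keys (arr : List (List (String × Int))) (key_fields : List String) (priority_field : String) (out : List (List (String × Int))) : Prop := out = merge_dicts_by_keys_alt arr key_fields priority_field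
instance (arr : List (List (String × Int))) (key_fields : List String) (priority_field : String) (out : List (List (String × Int))) : Decidable (Spec_merge_dicts_by_keys arr key_fields priority_field out) := by unfold Spec_merge_dicts_by_keys; infer_instance

-- ===== CLAIM (what is proved, stated in full; the proofs are below) =====
def Claim_equal_merge_dicts_by_keys : Prop := ∀ (arr : List (List (String × Int))) (key_fields : List String) (priority_field : String), Dom_merge_dicts_by_keys arr key_fields priority_field → Pre_merge_dicts_by_keys arr key_fields priority_field → Spec_merge_dicts_by_keys arr key_fields priority_field (merge_dicts_by_keys arr key_fields priority_field)

-- ===== LEMMAS AND PROOFS =====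

-- B's group reducer, as a function of the group list
def pvRed (pf : String) (l : List (List (String × Int))) : List (String × Int) :=
  pvBestOf pf l

-- map pvRed over a dict's values
def pvMapVal (pf : String) (g : PySem.Dict (List Int) (List (List (String × Int)))) :
    PySem.Dict (List Int) (List (String × Int)) :=
  PySem.Dict.mk (g.items.map (fun p => (p.1, pvRed pf p.2)))

lemma pvMapVal_contains (pf : String) (g : PySem.Dict (List Int) (List (List (String × Int)))) (k : List Int) :
    (pvMapVal pf g).contains k = g.contains k := by
  simp [pvMapVal, PySem.Dict.contains, List.any_map, Function.comp_def]

lemma pvMapVal_keys (pf : String) (g : PySem.Dict (List Int) (List (List (String × Int)))) :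
    (pvMapVal pf g).keys = g.keys := by
  simp [pvMapVal, PySem.Dict.keys, List.map_map, Function.comp]

lemma pvMapVal_insert (pf : String) (g : PySem.Dict (List Int) (List (List (String × Int))))
    (k : List Int) (v : List (List (String × Int))) :
    pvMapVal pf (g.insert k v) = (pvMapVal pf g).insert k (pvRed pf v) := by
  apply PySem.Dict.ext
  by_cases hc : g.contains k = true
  · have hc' : (pvMapVal pf g).contains k = true := by rw [pvMapVal_contains]; exact hc
    show List.map (fun p => (p.1, pvRed pf p.2)) (g.insert k v).items = _
    rw [PySem.Dict.items_insert_of_contains g v hc,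
        PySem.Dict.items_insert_of_contains (pvMapVal pf g) (pvRed pf v) hc']
    show _ = List.map _ (List.map (fun p => (p.1, pvRed pf p.2)) g.items)
    rw [List.map_map, List.map_map]
    apply List.map_congr_left
    intro p _
    simp only [Function.comp_apply]
    split_ifs with h <;> simp
  · have hcf : g.contains k = false := by simpa using hc
    have hc' : (pvMapVal pf g).contains k = false := by rw [pvMapVal_contains]; exact hcf
    show List.map (fun p => (p.1, pvRed pf p.2)) (g.insert k v).items = _
    rw [PySem.Dict.items_insert_of_not_contains g v hcf,
        PySem.Dict.items_insert_of_not_contains (pvMapVal pf g) (pvRed pf v) hc']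
    simp [pvMapVal]

lemma pvMapVal_get? (pf : String) (g : PySem.Dict (List Int) (List (List (String × Int))))
    (k : List Int) (l : List (List (String × Int))) (hnd : g.keys.Nodup)
    (h : g.get? k = some l) : (pvMapVal pf g).get? k = some (pvRed pf l) := by
  have hm : (k, l) ∈ g.items := PySem.Dict.mem_items_of_get?_eq_some g h
  have hm' : (k, pvRed pf l) ∈ (pvMapVal pf g).items := by
    simp only [pvMapVal]
    exact List.mem_map.2 ⟨(k, l), hm, rfl⟩
  have hnd' : (pvMapVal pf g).keys.Nodup := by rw [pvMapVal_keys]; exact hnd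
  exact PySem.Dict.get?_of_mem_items (pvMapVal pf g) hm' hnd'

-- inserting the value already present changes nothing
lemma pvInsert_get?_self {ν : Type} (d : PySem.Dict (List Int) ν) (k : List Int) (v : ν)
    (hnd : d.keys.Nodup) (h : d.get? k = some v) : d.insert k v = d := by
  have hc : d.contains k = true := by
    rw [PySem.Dict.contains_eq_isSome_get?, h]; rfl
  apply PySem.Dict.ext
  rw [PySem.Dict.items_insert_of_contains d v hc]
  have hm : (k, v) ∈ d.items := PySem.Dict.mem_items_of_get?_eq_some d h
  conv_rhs => rw [← List.map_id d.items]
  apply List.map_congr_left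
  intro p hp
  by_cases hpk : (p.1 == k) = true
  · have hk : p.1 = k := by simpa using hpk
    have : p = (k, v) := by
      have h1 : d.items.map Prod.fst |>.Nodup := hnd
      rcases p with ⟨pk, pv⟩
      simp only at hk; subst hk
      -- two items with the same key in a Nodup-keys list are equal
      have := List.inj_on_of_nodup_map h1 hp hm rfl
      simpa using this
    simp [this]
  · simp [hpk]

lemma pvRed_append (pf : String) (l : List (List (String × Int))) (hne : l ≠ [])
    (item : List (String × Int)) :
    pvRed pf (l ++ [item]) =
      if pvItemGet item pf ≥ pvItemGet (pvRed pf l) pf then item else pvRed pf l := by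
  rcases l with _ | ⟨h, t⟩
  · exact absurd rfl hne
  · simp [pvRed, pvBestOf, List.foldl_append]

-- the main invariant: A's fold state is B's fold state with every group reduced
lemma pvMain (kf : List String) (pf : String) (arr : List (List (String × Int))) :
    ∀ g : PySem.Dict (List Int) (List (List (String × Int))), g.keys.Nodup →
      (∀ p ∈ g.items, p.2 ≠ []) →
      arr.foldl (pvMergeStep kf pf) (pvMapVal pf g) =
        pvMapVal pf (arr.foldl (pvGroupStep kf) g) := by
  induction arr with
  | nil => intro g _ _; simp
  | cons item rest ih =>
    intro g hnd hne
    simp only [List.foldl_cons]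
    set gk := pvGroupKey kf item with hgk
    have hstepB : pvGroupStep kf g item = g.insert gk ((g.getD gk []) ++ [item]) := by
      simp [pvGroupStep, PySem.Dict.modify, hgk]
    have hnd' : (g.insert gk ((g.getD gk []) ++ [item])).keys.Nodup :=
      PySem.Dict.nodup_keys_insert _ _ _ hnd
    have hne' : ∀ p ∈ (g.insert gk ((g.getD gk []) ++ [item])).items, p.2 ≠ [] := by
      intro p hp
      rcases (PySem.Dict.mem_items_insert _ _ _ _).1 hp with h | ⟨hmem, _⟩
      · subst h; simp
      · exact hne p hmem
    by_cases hc : g.contains gk = true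
    · -- group already present
      have hsome : (g.get? gk).isSome := by
        rw [← PySem.Dict.contains_eq_isSome_get?]; exact hc
      rcases Option.isSome_iff_exists.1 hsome with ⟨l, hl⟩
      have hlne : l ≠ [] := hne (gk, l) (PySem.Dict.mem_items_of_get?_eq_some g hl)
      have hgetD : g.getD gk [] = l := PySem.Dict.getD_of_get?_eq_some g [] hl
      have hget' : (pvMapVal pf g).get? gk = some (pvRed pf l) := pvMapVal_get? pf g gk l hnd hl
      have hgetD' : (pvMapVal pf g).getD gk [] = pvRed pf l :=
        PySem.Dict.getD_of_get?_eq_some (pvMapVal pf g) [] hget'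
      have hc' : (pvMapVal pf g).contains gk = true := by rw [pvMapVal_contains]; exact hc
      have hstepA : pvMergeStep kf pf (pvMapVal pf g) item =
          (pvMapVal pf g).insert gk (pvRed pf (l ++ [item])) := by
        rw [pvRed_append pf l hlne item]
        simp only [pvMergeStep, ← hgk, hc', hgetD']
        by_cases h1 : pvItemGet item pf > pvItemGet (pvRed pf l) pf
        · simp [h1, le_of_lt h1]
        · by_cases h2 : pvItemGet item pf = pvItemGet (pvRed pf l) pf
          · simp [h2]
          · have h3 : ¬ pvItemGet item pf ≥ pvItemGet (pvRed pf l) pf := by omega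
            simp only [h1, h2, if_false, if_neg h3]
            exact (pvInsert_get?_self (pvMapVal pf g) gk (pvRed pf l)
              (by rw [pvMapVal_keys]; exact hnd) hget').symm
      rw [hstepA, hstepB, hgetD, ← pvMapVal_insert]
      exact ih _ (hgetD ▸ hnd') (hgetD ▸ hne')
    · -- new group
      have hc' : (pvMapVal pf g).contains gk = false := by
        rw [pvMapVal_contains]; simpa using hc
      have hgetD : g.getD gk [] = [] :=
        PySem.Dict.getD_of_not_contains g [] (by simpa using hc)
      have hstepA : pvMergeStep kf pf (pvMapVal pf g) item =
          (pvMapVal pf g).insert gk item := by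
        simp [pvMergeStep, ← hgk, hc']
      have hredone : pvRed pf [item] = item := rfl
      rw [hstepA, hstepB, hgetD]
      simp only [List.nil_append]
      rw [← hredone, ← pvMapVal_insert]
      exact ih _ (by rw [hgetD] at hnd'; simpa using hnd')
        (by rw [hgetD] at hne'; simpa using hne')

lemma pvMapVal_empty (pf : String) : pvMapVal pf PySem.Dict.empty = PySem.Dict.empty := rfl

-- ===== VERDICT (by name: the statement is the Claim_ definition above) =====
theorem merge_dicts_by_keys_spec : Claim_equal_merge_dicts_by_keys := by
  intro arr kf pf _ _
  unfold Spec_merge_dicts_by_keys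
  unfold merge_dicts_by_keys merge_dicts_by_keys_alt
  rw [← pvMapVal_empty pf, pvMain kf pf arr PySem.Dict.empty (by simp [PySem.Dict.empty]) (by simp [PySem.Dict.empty])]
  simp [pvMapVal, PySem.Dict.values, List.map_map, Function.comp, pvRed]
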